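-- pv_equiv track=rewrite | github.com/rafaelflores-nefadv/nef-controldesk-revobot-siscobra | src/core/download_api.py | _normalizar_pasta_remota
-- ===== SOURCE A (Python) =====
-- FILE_MANAGER_ROOT = r"..\UPLOAD"
--
-- def _normalizar_pasta_remota(pasta: str) -> str:
--     if pasta is None:
--         raise ValueError("A pasta remota deve ser informada.")
--
--     normalized = str(pasta).strip().replace("/", "\\")
--     while "\\\\" in normalized:
--         normalized = normalized.replace("\\\\", "\\")
--     normalized = normalized.strip("\\")
--
--     if not normalized or normalized == ".":
--         return ""
--
--     lower = normalized.lower()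
--     root_lower = FILE_MANAGER_ROOT.lower()
--     if lower == root_lower:
--         return ""
--     if lower.startswith(f"{root_lower}\\"):
--         return normalized[len(FILE_MANAGER_ROOT) + 1 :]
--     if lower == "upload":
--         return ""
--     if lower.startswith("upload\\"):
--         return normalized[len("UPLOAD\\") :]
--     return normalized
-- ===== SOURCE B (Python) =====
-- FILE_MANAGER_ROOT = r"..\UPLOAD"
--
-- def _normalizar_pasta_remota(pasta: str) -> str:
--     # segment-based: split once, drop empty segments, compare lowered segment lists
--     segs = [s for s in str(pasta).strip().replace("/", "\\").split("\\") if s]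
--     if not segs or segs == ["."]:
--         return ""
--     low = [s.lower() for s in segs]
--     if low[:2] == ["..", "upload"]:
--         return "\\".join(segs[2:])
--     if low[0] == "upload":
--         return "\\".join(segs[1:])
--     return "\\".join(segs)
-- ===== Notes on version B (the rewrite author's own statement) =====
-- stated objective: simpler
-- what changed: A collapses doubled backslashes with a repeated global replace() loop, strips, and does prefix/equality tests on the lowered string; B instead splits the path once into its non-empty segments and compares the lowercased segment list against the root components, rejoining the remaining segments.
import Mathlib
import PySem

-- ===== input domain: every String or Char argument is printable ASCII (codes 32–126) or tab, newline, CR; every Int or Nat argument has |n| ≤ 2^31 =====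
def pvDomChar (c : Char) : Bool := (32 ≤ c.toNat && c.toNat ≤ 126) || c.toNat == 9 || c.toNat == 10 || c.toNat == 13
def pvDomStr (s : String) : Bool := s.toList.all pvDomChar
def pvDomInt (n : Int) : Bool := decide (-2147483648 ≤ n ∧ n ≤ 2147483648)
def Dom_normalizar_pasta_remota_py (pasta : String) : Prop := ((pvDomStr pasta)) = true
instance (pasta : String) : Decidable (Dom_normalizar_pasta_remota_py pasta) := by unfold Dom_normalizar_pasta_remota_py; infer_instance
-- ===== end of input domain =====

-- Port A: the original fixpoint loop (replace "\\\\"->"\\" until none remains), then strip and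
-- prefix tests on the lowered string. Port B: split once into segments and compare segment lists.
-- B is simpler: one split pass instead of a repeated global-replace loop; same return value.

-- ===== PORT A =====
-- simple structural model of one replace("\\\\","\\") pass (used for the termination bound)
def pvRep : List Char → List Char
  | [] => []
  | [c] => [c]
  | c :: d :: t => if c = '\\' ∧ d = '\\' then '\\' :: pvRep t else c :: pvRep (d :: t)

lemma pvRepGo_eq (fuel : Nat) (l acc : List Char) (h : l.length ≤ fuel) :
    PySem.Chars.replace.go ['\\', '\\'] ['\\'] fuel l acc = acc.reverse ++ pvRep l := by
  induction fuel generalizing l acc with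
  | zero =>
    have : l = [] := by cases l <;> simp_all
    subst this
    simp [PySem.Chars.replace.go, pvRep]
  | succ n ih =>
    cases l with
    | nil => simp [PySem.Chars.replace.go, pvRep]
    | cons c t =>
      rw [PySem.Chars.replace.go]
      by_cases hp : List.isPrefixOf ['\\', '\\'] (c :: t) = true
      · rw [if_pos hp]
        cases t with
        | nil => simp [List.isPrefixOf] at hp
        | cons d t' =>
          simp [List.isPrefixOf] at hp
          obtain ⟨hc, hd⟩ := hp
          subst hc; subst hd
          simp only [List.length_cons] at h
          rw [show List.drop (['\\', '\\'] : List Char).length ('\\' :: '\\' :: t') = t' from rfl]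
          rw [ih t' _ (by omega)]
          simp [pvRep]
      · rw [if_neg hp]
        simp only [List.length_cons] at h
        rw [ih _ _ (by omega)]
        cases t with
        | nil => simp [pvRep]
        | cons d t' =>
          have hcd : ¬(c = '\\' ∧ d = '\\') := by
            rintro ⟨rfl, rfl⟩; simp [List.isPrefixOf] at hp
          simp [pvRep, hcd]

lemma pvReplaceBB_eq (cs : List Char) :
    PySem.Chars.replace cs ['\\', '\\'] ['\\'] = pvRep cs := by
  rw [PySem.Chars.replace]
  simp only [List.isEmpty_cons, Bool.false_eq_true, if_false]
  exact pvRepGo_eq cs.length cs [] le_rfl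

lemma pvRep_length_le (l : List Char) : (pvRep l).length ≤ l.length := by
  fun_induction pvRep with
  | case1 => simp
  | case2 c => simp
  | case3 c d t h ih => simp; omega
  | case4 c d t h ih => simpa using ih

lemma pvRep_length_lt (l : List Char) (h : ['\\', '\\'] <:+: l) :
    (pvRep l).length < l.length := by
  fun_induction pvRep with
  | case1 => simp at h
  | case2 c => exact absurd h.length_le (by simp)
  | case3 c d t hcd ih =>
    have := pvRep_length_le t
    simp
    omega
  | case4 c d t hcd ih =>
    have hinf : ['\\', '\\'] <:+: (d :: t) := by
      rcases (List.infix_cons_iff).mp h with hpre | hinf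
      · exfalso
        rcases hpre with ⟨u, hu⟩
        simp at hu
        exact hcd ⟨hu.1.symm, hu.2.1.symm⟩
      · exact hinf
    have := ih hinf
    simp only [List.length_cons] at this ⊢
    omega

lemma pvReplaceBB_length_lt (cs : List Char)
    (h : PySem.Chars.isIn ['\\', '\\'] cs = true) :
    (PySem.Chars.replace cs ['\\', '\\'] ['\\']).length < cs.length := by
  rw [pvReplaceBB_eq]
  exact pvRep_length_lt cs ((PySem.Chars.isIn_iff_infix _ _).mp h)

-- the while loop of A
def pvCollapse (cs : List Char) : List Char :=
  if h : PySem.Chars.isIn ['\\', '\\'] cs = true then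
    pvCollapse (PySem.Chars.replace cs ['\\', '\\'] ['\\'])
  else cs
termination_by cs.length
decreasing_by exact pvReplaceBB_length_lt cs h

def normalizar_pasta_remota_py (pasta : String) : String :=
  let n0 := PySem.Chars.replace (PySem.Chars.strip pasta.toList) ['/'] ['\\']
  let n1 := pvCollapse n0
  let normalized := PySem.Chars.stripChars n1 ['\\']
  if normalized = [] ∨ normalized = ['.'] then ""
  else
    let lower := PySem.Chars.lower normalized
    let rootLower := PySem.Chars.lower "..\\UPLOAD".toList
    if lower = rootLower then ""
    else if PySem.Chars.startswith lower (rootLower ++ ['\\']) = true then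
      String.ofList (PySem.Chars.slice normalized (some ((PySem.Chars.len "..\\UPLOAD".toList : Int) + 1)) none)
    else if lower = "upload".toList then ""
    else if PySem.Chars.startswith lower ("upload".toList ++ ['\\']) = true then
      String.ofList (PySem.Chars.slice normalized (some (PySem.Chars.len "UPLOAD\\".toList : Int)) none)
    else String.ofList normalized

-- ===== PORT B =====
def normalizar_pasta_remota_py_alt (pasta : String) : String :=
  let segs := (PySem.Chars.splitOn
      (PySem.Chars.replace (PySem.Chars.strip pasta.toList) ['/'] ['\\']) ['\\']).filter (· ≠ [])
  if segs = [] ∨ segs = [['.']] then ""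
  else
    let low := segs.map PySem.Chars.lower
    if low.take 2 = [['.', '.'], "upload".toList] then
      String.ofList (PySem.Chars.join ['\\'] (segs.drop 2))
    else if low.headI = "upload".toList then
      String.ofList (PySem.Chars.join ['\\'] (segs.drop 1))
    else String.ofList (PySem.Chars.join ['\\'] segs)

-- ===== PRECONDITION & SPEC =====
def Spec_normalizar_pasta_remota_py (pasta : String) (out : String) : Prop := out = normalizar_pasta_remota_py_alt pasta
instance (pasta : String) (out : String) : Decidable (Spec_normalizar_pasta_remota_py pasta out) := by unfold Spec_normalizar_pasta_remota_py; infer_instance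

-- ===== CLAIM (what is proved, stated in full; the proofs are below) =====
def Claim_equal_normalizar_pasta_remota_py : Prop := ∀ (pasta : String), Dom_normalizar_pasta_remota_py pasta → Spec_normalizar_pasta_remota_py pasta (normalizar_pasta_remota_py pasta)

-- ===== LEMMAS AND PROOFS =====

def pvStep (c : Char) (y : List Char) : List Char :=
  if c = '\\' ∧ y.head? = some '\\' then y else c :: y

def pvSquash : List Char → List Char
  | [] => []
  | c :: t => pvStep c (pvSquash t)

lemma pvStep_b (y : List Char) :
    pvStep '\\' y = '\\' :: (if y.head? = some '\\' then y.tail else y) := by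
  cases y with
  | nil => simp [pvStep]
  | cons a z =>
    by_cases h : a = '\\' <;> simp [pvStep, h]

lemma pvStep_bb (y : List Char) : pvStep '\\' (pvStep '\\' y) = pvStep '\\' y := by
  rw [pvStep_b y]
  simp [pvStep]

lemma pvSquash_rep (cs : List Char) : pvSquash (pvRep cs) = pvSquash cs := by
  fun_induction pvRep with
  | case1 => rfl
  | case2 c => rfl
  | case3 c d t h ih =>
    obtain ⟨rfl, rfl⟩ := h
    simp only [pvSquash, ih]
    exact (pvStep_bb (pvSquash t)).symm
  | case4 c d t h ih =>
    simp only [pvSquash, ih]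

lemma pvSquash_no_bb (cs : List Char) (h : ¬ (['\\', '\\'] <:+: cs)) : pvSquash cs = cs := by
  induction cs with
  | nil => rfl
  | cons c t ih =>
    have ht : ¬ (['\\', '\\'] <:+: t) := fun hi => h (List.infix_cons_iff.mpr (Or.inr hi))
    have hp : ¬ (['\\', '\\'] <+: (c :: t)) := fun hp => h (List.infix_cons_iff.mpr (Or.inl hp))
    simp only [pvSquash, ih ht, pvStep]
    rw [if_neg]
    rintro ⟨rfl, hh⟩
    cases t with
    | nil => simp at hh
    | cons d t' =>
      simp at hh
      exact hp (by rw [hh]; exact ⟨t', rfl⟩)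

lemma pvCollapse_eq (cs : List Char) : pvCollapse cs = pvSquash cs := by
  fun_induction pvCollapse with
  | case1 cs h ih =>
    rw [ih, pvReplaceBB_eq, pvSquash_rep]
  | case2 cs h =>
    rw [pvSquash_no_bb]
    intro hi
    exact h ((PySem.Chars.isIn_iff_infix _ _).mpr hi)

lemma pvSquash_head (t z : List Char) (h : pvSquash t = '\\' :: z) : z.head? ≠ some '\\' := by
  induction t generalizing z with
  | nil => simp [pvSquash] at h
  | cons c t' ih =>
    simp only [pvSquash, pvStep] at h
    split_ifs at h with hc
    · exact ih z h
    · obtain ⟨rfl, hz⟩ : c = '\\' ∧ (pvSquash t') = z := by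
        injection h with h1 h2; exact ⟨h1, h2⟩
      rw [← hz]
      intro hh
      exact hc ⟨rfl, hh⟩

-- strip machinery
def pvP : Char → Bool := fun c => (['\\'] : List Char).contains c

def pvLstrip (y : List Char) : List Char := y.dropWhile pvP
def pvRstrip (y : List Char) : List Char := (y.reverse.dropWhile pvP).reverse
def pvStrip (y : List Char) : List Char := pvRstrip (pvLstrip y)

lemma pvStripChars_eq (s : List Char) :
    PySem.Chars.stripChars s ['\\'] = pvStrip s := rfl

lemma pvLstrip_cons_b (y : List Char) : pvLstrip ('\\' :: y) = pvLstrip y := by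
  simp [pvLstrip, List.dropWhile_cons, pvP]

lemma pvLstrip_cons (c : Char) (y : List Char) (h : c ≠ '\\') : pvLstrip (c :: y) = c :: y := by
  simp [pvLstrip, List.dropWhile_cons, pvP, h]

lemma pvRstrip_cons (c : Char) (y : List Char) (h : c ≠ '\\') :
    pvRstrip (c :: y) = c :: pvRstrip y := by
  simp only [pvRstrip, List.reverse_cons, List.dropWhile_append]
  split_ifs with he
  · simp only [List.isEmpty_iff] at he
    simp [he, List.dropWhile_cons, pvP, h]
  · simp

lemma pvRstrip_cons_b (y : List Char) :
    pvRstrip ('\\' :: y) = if pvRstrip y = [] then [] else '\\' :: pvRstrip y := by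
  simp only [pvRstrip, List.reverse_cons, List.dropWhile_append]
  by_cases he : List.dropWhile pvP y.reverse = []
  · rw [if_pos (by simp [he]), if_pos (by simp [he])]
    simp [pvP]
  · rw [if_neg (by simpa using he), if_neg (by simp [he])]
    simp

-- intercalate helpers
lemma pvIC (p : List Char) (ps : List (List Char)) :
    (['\\'] : List Char).intercalate (p :: ps)
      = p ++ if ps = [] then [] else '\\' :: ['\\'].intercalate ps := by
  cases ps <;> simp [List.intercalate]

lemma pvINE (ps : List (List Char)) (h : ∀ p ∈ ps, p ≠ []) :
    (['\\'] : List Char).intercalate ps = [] ↔ ps = [] := by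
  cases ps with
  | nil => simp [List.intercalate]
  | cons p ps' =>
    rw [pvIC]
    constructor
    · intro he
      exfalso
      rcases List.append_eq_nil_iff.mp he with ⟨hp, _⟩
      exact h p (by simp) hp
    · intro he; simp at he

-- splitOn bridge
lemma pvSplitGo_eq (fuel : Nat) (l cur : List Char) (acc : List (List Char))
    (h : l.length + 1 ≤ fuel) :
    PySem.Chars.splitOn.go ['\\'] fuel l cur acc
      = acc.reverse ++ (l.splitOn '\\').modifyHead (cur.reverse ++ ·) := by
  induction fuel generalizing l cur acc with
  | zero => omega
  | succ n ih =>
    cases l with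
    | nil =>
      rw [PySem.Chars.splitOn.go]
      simp [List.splitOn, List.splitOnP_nil]
      omega
    | cons c rest =>
      rw [PySem.Chars.splitOn.go]
      by_cases hc : c = '\\'
      · subst hc
        rw [if_pos (by simp [List.isPrefixOf])]
        simp only [List.length_cons] at h
        rw [show List.drop (['\\'] : List Char).length ('\\' :: rest) = rest from rfl]
        rw [ih rest [] _ (by omega)]
        rw [show ('\\' :: rest).splitOn '\\' = [] :: rest.splitOn '\\' from by
          simp [List.splitOn, List.splitOnP_cons]]
        have hid : List.modifyHead (fun x : List Char => x) (List.splitOn '\\' rest) = List.splitOn '\\' rest := by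
          show List.modifyHead id _ = _
          rw [List.modifyHead_id]
          rfl
        simp [hid]
      · rw [if_neg (by simp [List.isPrefixOf, hc]; intro hh; exact absurd hh.symm hc)]
        simp only [List.length_cons] at h
        rw [ih rest (c :: cur) acc (by omega)]
        rw [show (c :: rest).splitOn '\\' = (rest.splitOn '\\').modifyHead (c :: ·) from by
          simp [List.splitOn, List.splitOnP_cons, hc]]
        rw [List.modifyHead_modifyHead]
        have hfn : ((fun x : List Char => cur.reverse ++ x) ∘ fun x => c :: x) = (fun x => (c :: cur).reverse ++ x) := by
          funext x; simp
        rw [hfn]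

lemma pvSplitOn_eq (cs : List Char) :
    PySem.Chars.splitOn cs ['\\'] = cs.splitOn '\\' := by
  rw [PySem.Chars.splitOn, pvSplitGo_eq (cs.length + 1) cs [] [] (by omega)]
  simp only [List.reverse_nil, List.nil_append]
  exact congrFun List.modifyHead_id _

def pvParts (cs : List Char) : List (List Char) := (cs.splitOn '\\').filter (· ≠ [])

lemma pvParts_mem_ne_nil (t : List Char) (p : List Char) (h : p ∈ pvParts t) : p ≠ [] := by
  simp only [pvParts] at h
  exact (by simpa using (List.mem_filter.mp h).2)

lemma pvSplitOn_not_mem (l : List Char) (p : List Char) (h : p ∈ l.splitOn '\\') : '\\' ∉ p := by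
  induction l generalizing p with
  | nil =>
    rw [show (([] : List Char).splitOn '\\') = [[]] from by simp [List.splitOn, List.splitOnP_nil]] at h
    simp at h
    simp [h]
  | cons c t ih =>
    by_cases hc : c = '\\'
    · subst hc
      rw [show ('\\' :: t).splitOn '\\' = [] :: t.splitOn '\\' by
        simp [List.splitOn, List.splitOnP_cons]] at h
      rcases List.mem_cons.mp h with rfl | h
      · simp
      · exact ih p h
    · rw [show (c :: t).splitOn '\\' = (t.splitOn '\\').modifyHead (c :: ·) by
        simp [List.splitOn, List.splitOnP_cons, hc]] at h
      obtain ⟨hd, tl, hsp⟩ : ∃ hd tl, t.splitOn '\\' = hd :: tl := by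
        rcases hx : t.splitOn '\\' with _ | ⟨hd, tl⟩
        · exact absurd hx (by simpa [List.splitOn] using List.splitOnP_ne_nil (fun x => x == '\\') t)
        · exact ⟨hd, tl, rfl⟩
      rw [hsp] at h
      simp only [List.modifyHead, List.mem_cons] at h
      rcases h with rfl | h
      · intro hm
        rcases List.mem_cons.mp hm with rfl | hm
        · exact hc rfl
        · exact ih hd (by rw [hsp]; simp) hm
      · exact ih p (by rw [hsp]; simp [h])

lemma pvParts_not_mem (t : List Char) (p : List Char) (h : p ∈ pvParts t) : '\\' ∉ p :=
  pvSplitOn_not_mem t p (by simp [pvParts, List.mem_filter] at h; exact h.1)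

lemma pvSplit_nil : (([] : List Char).splitOn '\\') = [[]] := by
  simp [List.splitOn, List.splitOnP_nil]

lemma pvSplit_cons_b (t : List Char) : ('\\' :: t).splitOn '\\' = [] :: t.splitOn '\\' := by
  simp [List.splitOn, List.splitOnP_cons]

lemma pvSplit_cons (c : Char) (t : List Char) (hc : c ≠ '\\') :
    (c :: t).splitOn '\\' = (t.splitOn '\\').modifyHead (c :: ·) := by
  simp [List.splitOn, List.splitOnP_cons, hc]

lemma pvSplit_ne_nil (t : List Char) : t.splitOn '\\' ≠ [] := by
  simpa [List.splitOn] using List.splitOnP_ne_nil (fun x => x == '\\') t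

lemma pvLstrip_nil' (z : List Char) (h : z.head? ≠ some '\\') : pvLstrip z = z := by
  cases z with
  | nil => rfl
  | cons e z' =>
    simp at h
    exact pvLstrip_cons e z' h

lemma pvLstrip_step_b (y : List Char) : pvLstrip (pvStep '\\' y) = pvLstrip y := by
  rw [pvStep_b, pvLstrip_cons_b]
  cases y with
  | nil => simp
  | cons a z =>
    by_cases ha : a = '\\'
    · subst ha; simp [pvLstrip_cons_b]
    · simp [ha]

lemma pvSquashDrop (t : List Char) :
    (if (pvSquash t).head? = some '\\' then (pvSquash t).tail else pvSquash t)
      = pvLstrip (pvSquash t) := by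
  cases hy : pvSquash t with
  | nil => simp [pvLstrip]
  | cons a z =>
    by_cases ha : a = '\\'
    · subst ha
      simp only [List.head?_cons, if_pos rfl, List.tail_cons, pvLstrip_cons_b]
      exact (pvLstrip_nil' z (pvSquash_head t z hy)).symm
    · simp [ha, pvLstrip_cons a z ha]

lemma pvParts_cons_b (t : List Char) : pvParts ('\\' :: t) = pvParts t := by
  simp [pvParts, pvSplit_cons_b]

lemma pvMM : ∀ (n : Nat) (t : List Char), t.length ≤ n →
    (pvRstrip (pvSquash t) = (t.splitOn '\\').headI ++
        (if ((t.splitOn '\\').tail.filter (· ≠ [])) = [] then []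
         else '\\' :: (['\\'] : List Char).intercalate ((t.splitOn '\\').tail.filter (· ≠ []))) ∧
     pvStrip (pvSquash t) = (['\\'] : List Char).intercalate (pvParts t)) := by
  intro n
  induction n with
  | zero =>
    intro t ht
    have : t = [] := by cases t <;> simp_all
    subst this
    constructor <;> simp [pvSquash, pvRstrip, pvStrip, pvLstrip, pvParts, pvSplit_nil, pvP, List.intercalate]
  | succ n ih =>
    intro t ht
    cases t with
    | nil =>
      constructor <;> simp [pvSquash, pvRstrip, pvStrip, pvLstrip, pvParts, pvSplit_nil, pvP, List.intercalate]
    | cons c t' =>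
      have ht' : t'.length ≤ n := by simp at ht; omega
      obtain ⟨ihM2, ihM⟩ := ih t' ht'
      have hsq : pvSquash (c :: t') = pvStep c (pvSquash t') := rfl
      by_cases hc : c = '\\'
      · subst hc
        have hPne : ∀ p ∈ pvParts t', p ≠ [] := fun p hp => pvParts_mem_ne_nil t' p hp
        constructor
        · -- rstrip side
          rw [hsq, pvStep_b, pvRstrip_cons_b, pvSquashDrop]
          have : pvRstrip (pvLstrip (pvSquash t')) = (['\\'] : List Char).intercalate (pvParts t') := ihM
          rw [this]
          rw [pvSplit_cons_b]
          simp only [List.headI, List.tail_cons, List.nil_append]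
          have hpp : (t'.splitOn '\\').filter (· ≠ []) = pvParts t' := rfl
          rw [hpp]
          by_cases hP : pvParts t' = []
          · rw [if_pos (by rw [hP]; simp [List.intercalate]), if_pos hP]
          · rw [if_neg (fun he => hP ((pvINE _ hPne).mp he)), if_neg hP]
        · -- strip side
          rw [hsq]
          show pvRstrip (pvLstrip (pvStep '\\' (pvSquash t'))) = _
          rw [pvLstrip_step_b]
          rw [pvParts_cons_b]
          exact ihM
      · obtain ⟨h0, tl, hsp0⟩ : ∃ h0 tl, t'.splitOn '\\' = h0 :: tl := by
          rcases hx : t'.splitOn '\\' with _ | ⟨h0, tl⟩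
          · exact absurd hx (pvSplit_ne_nil t')
          · exact ⟨h0, tl, rfl⟩
        have hspc : (c :: t').splitOn '\\' = (c :: h0) :: tl := by
          rw [pvSplit_cons c t' hc, hsp0]
          rfl
        have hstep : pvStep c (pvSquash t') = c :: pvSquash t' := by
          simp [pvStep, hc]
        constructor
        · rw [hsq, hstep, pvRstrip_cons c _ hc, ihM2, hsp0, hspc]
          simp
        · rw [hsq, hstep]
          show pvRstrip (pvLstrip (c :: pvSquash t')) = _
          rw [pvLstrip_cons c _ hc, pvRstrip_cons c _ hc, ihM2, hsp0]
          have hpc : pvParts (c :: t') = (c :: h0) :: tl.filter (· ≠ []) := by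
            simp only [pvParts, hspc, List.filter_cons]
            simp
          rw [hpc, pvIC]
          simp only [List.headI, List.tail_cons]
          by_cases hT : tl.filter (· ≠ []) = []
          · have hT' : (List.filter (fun a => decide ¬a = []) tl) = [] := by simpa using hT
            simp [hT, hT']
          · have hT' : ¬ (List.filter (fun a => decide ¬a = []) tl) = [] := by simpa using hT
            simp [hT, hT']

lemma pvStrip_squash (t : List Char) :
    pvStrip (pvSquash t) = (['\\'] : List Char).intercalate (pvParts t) :=
  (pvMM t.length t le_rfl).2

-- lower-case helpers
lemma pvLowerChar_b (c : Char) (h : PySem.Chars.lowerChar c = '\\') : c = '\\' := by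
  unfold PySem.Chars.lowerChar at h
  split_ifs at h with hu
  · exfalso
    simp only [PySem.Chars.isupper, Bool.and_eq_true, decide_eq_true_eq] at hu
    obtain ⟨h1, h2⟩ := hu
    rw [Char.le_def] at h1 h2
    rw [UInt32.le_iff_toNat_le] at h1 h2
    have e1 : ('A').val.toNat = 65 := by decide
    have e2 : c.val.toNat = c.toNat := rfl
    have hv : (c.toNat + 32).isValidChar := by
      left
      have e3 : ('Z').val.toNat = 90 := by decide
      omega
    have h3 := congrArg Char.toNat h
    rw [Char.toNat_ofNat, if_pos hv] at h3
    have hb : ('\\').toNat = 92 := by decide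
    omega
  · exact h

lemma pvLower_ne_nil (p : List Char) (h : p ≠ []) : PySem.Chars.lower p ≠ [] := by
  simp [PySem.Chars.lower, h]

lemma pvLower_not_mem (p : List Char) (h : '\\' ∉ p) : '\\' ∉ PySem.Chars.lower p := by
  intro hm
  rw [PySem.Chars.lower, List.mem_map] at hm
  obtain ⟨c, hc, hl⟩ := hm
  exact h (pvLowerChar_b c hl ▸ hc)

lemma pvLower_intercalate (ps : List (List Char)) :
    PySem.Chars.lower ((['\\'] : List Char).intercalate ps)
      = (['\\'] : List Char).intercalate (ps.map PySem.Chars.lower) := by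
  induction ps with
  | nil => simp [PySem.Chars.lower, List.intercalate]
  | cons p ps' ih =>
    cases ps' with
    | nil => simp [pvIC, PySem.Chars.lower]
    | cons r rs =>
      rw [List.map_cons]
      rw [pvIC p (r :: rs), pvIC (PySem.Chars.lower p) (List.map PySem.Chars.lower (r :: rs))]
      rw [if_neg (by simp), if_neg (by simp)]
      have hsplit : PySem.Chars.lower (p ++ '\\' :: (['\\'] : List Char).intercalate (r :: rs))
          = PySem.Chars.lower p ++ '\\' :: PySem.Chars.lower ((['\\'] : List Char).intercalate (r :: rs)) := by
        simp [PySem.Chars.lower, (by decide : PySem.Chars.lowerChar '\\' = '\\')]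
      rw [hsplit, ih, List.map_cons]

-- injectivity of intercalate on backslash-free nonempty parts
lemma pvInterc_inj (ps qs : List (List Char))
    (hp1 : ∀ p ∈ ps, p ≠ []) (hp2 : ∀ p ∈ ps, '\\' ∉ p)
    (hq1 : ∀ p ∈ qs, p ≠ []) (hq2 : ∀ p ∈ qs, '\\' ∉ p)
    (h : (['\\'] : List Char).intercalate ps = ['\\'].intercalate qs) : ps = qs := by
  by_cases hps : ps = []
  · subst hps
    have : (['\\'] : List Char).intercalate qs = [] := by
      rw [← h]; simp [List.intercalate]
    exact ((pvINE qs hq1).mp this).symm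
  · by_cases hqs : qs = []
    · subst hqs
      have : (['\\'] : List Char).intercalate ps = [] := by
        rw [h]; simp [List.intercalate]
      exact absurd ((pvINE ps hp1).mp this) hps
    · have := List.splitOn_intercalate ps '\\' hp2 hps
      rw [h, List.splitOn_intercalate qs '\\' hq2 hqs] at this
      exact this.symm

-- prefix characterization
lemma pvPrefix_iff (q : List Char) (u p : List Char) (ps' : List (List Char))
    (hp : '\\' ∉ p) (hq : '\\' ∉ q) :
    ((q ++ '\\' :: u) <+: (['\\'] : List Char).intercalate (p :: ps')
      ↔ (q = p ∧ ps' ≠ [] ∧ u <+: (['\\'] : List Char).intercalate ps')) := by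
  induction q generalizing p with
  | nil =>
    cases p with
    | nil =>
      rw [pvIC]
      cases ps' with
      | nil => simp
      | cons r rs =>
        rw [if_neg (by simp)]
        simp only [List.nil_append, List.cons_prefix_cons, true_and]
        simp
    | cons a p' =>
      have ha : a ≠ '\\' := fun hh => hp (hh ▸ List.mem_cons_self)
      rw [pvIC]
      simp only [List.cons_append, List.nil_append, List.cons_prefix_cons]
      constructor
      · rintro ⟨hh, -⟩; exact absurd hh.symm ha
      · rintro ⟨hh, -⟩; simp at hh
  | cons d q' ih =>
    have hd : d ≠ '\\' := fun hh => hq (hh ▸ List.mem_cons_self)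
    have hq' : '\\' ∉ q' := fun hm => hq (List.mem_cons_of_mem d hm)
    cases p with
    | nil =>
      rw [pvIC]
      cases ps' with
      | nil => simp
      | cons r rs =>
        rw [if_neg (by simp)]
        simp only [List.nil_append, List.cons_append, List.cons_prefix_cons]
        constructor
        · rintro ⟨hh, -⟩; exact absurd hh hd
        · rintro ⟨hh, -⟩; simp at hh
    | cons a p' =>
      have hp' : '\\' ∉ p' := fun hm => hp (List.mem_cons_of_mem a hm)
      rw [pvIC]
      simp only [List.cons_append, List.cons_prefix_cons]
      have hX : p' ++ (if ps' = [] then [] else '\\' :: (['\\'] : List Char).intercalate ps')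
          = (['\\'] : List Char).intercalate (p' :: ps') := (pvIC p' ps').symm
      rw [hX, ih p' hp' hq']
      constructor
      · rintro ⟨rfl, rfl, h3, h4⟩; exact ⟨rfl, h3, h4⟩
      · rintro ⟨hh, h3, h4⟩
        injection hh with h5 h6
        exact ⟨h5, h6, h3, h4⟩

lemma pvJoin_eq (xs : List (List Char)) :
    PySem.Chars.join ['\\'] xs = (['\\'] : List Char).intercalate xs := rfl

lemma pvSlice10 (xs : List Char) :
    PySem.Chars.slice xs (some ((PySem.Chars.len "..\\UPLOAD".toList : Int) + 1)) none
      = xs.drop 10 := by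
  rw [show ((PySem.Chars.len "..\\UPLOAD".toList : Int) + 1) = ((10 : Nat) : Int) from by decide]
  rw [PySem.Chars.slice_eq_listSlice, PySem.List.slice_from_natCast]

lemma pvSlice7 (xs : List Char) :
    PySem.Chars.slice xs (some (PySem.Chars.len "UPLOAD\\".toList : Int)) none = xs.drop 7 := by
  rw [show (PySem.Chars.len "UPLOAD\\".toList : Int) = ((7 : Nat) : Int) from by decide]
  rw [PySem.Chars.slice_eq_listSlice, PySem.List.slice_from_natCast]

lemma pvDropIC10 (s1 s2 : List Char) (rest : List (List Char))
    (h1 : s1.length = 2) (h2 : s2.length = 6) (hr : rest ≠ []) :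
    ((['\\'] : List Char).intercalate (s1 :: s2 :: rest)).drop 10
      = (['\\'] : List Char).intercalate rest := by
  rw [pvIC s1 (s2 :: rest), if_neg (by simp), pvIC s2 rest, if_neg hr]
  have hsh : s1 ++ '\\' :: (s2 ++ '\\' :: (['\\'] : List Char).intercalate rest)
      = (s1 ++ '\\' :: s2 ++ ['\\']) ++ (['\\'] : List Char).intercalate rest := by simp
  rw [hsh, List.drop_left' (by simp [h1, h2])]

lemma pvDropIC7 (s1 : List Char) (rest : List (List Char))
    (h1 : s1.length = 6) (hr : rest ≠ []) :
    ((['\\'] : List Char).intercalate (s1 :: rest)).drop 7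
      = (['\\'] : List Char).intercalate rest := by
  rw [pvIC s1 rest, if_neg hr]
  have hsh : s1 ++ '\\' :: (['\\'] : List Char).intercalate rest
      = (s1 ++ ['\\']) ++ (['\\'] : List Char).intercalate rest := by simp
  rw [hsh, List.drop_left' (by simp [h1])]

lemma pvBranches (ps : List (List Char))
    (hne : ∀ p ∈ ps, p ≠ []) (hnb : ∀ p ∈ ps, '\\' ∉ p) :
    (if (['\\'] : List Char).intercalate ps = [] ∨ (['\\'] : List Char).intercalate ps = ['.'] then ""
     else if PySem.Chars.lower ((['\\'] : List Char).intercalate ps) = PySem.Chars.lower "..\\UPLOAD".toList then ""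
     else if PySem.Chars.startswith (PySem.Chars.lower ((['\\'] : List Char).intercalate ps))
         (PySem.Chars.lower "..\\UPLOAD".toList ++ ['\\']) = true then
       String.ofList (PySem.Chars.slice ((['\\'] : List Char).intercalate ps)
         (some ((PySem.Chars.len "..\\UPLOAD".toList : Int) + 1)) none)
     else if PySem.Chars.lower ((['\\'] : List Char).intercalate ps) = "upload".toList then ""
     else if PySem.Chars.startswith (PySem.Chars.lower ((['\\'] : List Char).intercalate ps))
         ("upload".toList ++ ['\\']) = true then
       String.ofList (PySem.Chars.slice ((['\\'] : List Char).intercalate ps)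
         (some (PySem.Chars.len "UPLOAD\\".toList : Int)) none)
     else String.ofList ((['\\'] : List Char).intercalate ps))
    =
    (if ps = [] ∨ ps = [['.']] then ""
     else if (ps.map PySem.Chars.lower).take 2 = [['.', '.'], "upload".toList] then
       String.ofList (PySem.Chars.join ['\\'] (ps.drop 2))
     else if (ps.map PySem.Chars.lower).headI = "upload".toList then
       String.ofList (PySem.Chars.join ['\\'] (ps.drop 1))
     else String.ofList (PySem.Chars.join ['\\'] ps)) := by
  have hlow : PySem.Chars.lower ((['\\'] : List Char).intercalate ps)
      = (['\\'] : List Char).intercalate (ps.map PySem.Chars.lower) := pvLower_intercalate ps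
  have hMne : ∀ m ∈ ps.map PySem.Chars.lower, m ≠ [] := by
    intro m hm
    obtain ⟨p, hp, rfl⟩ := List.mem_map.mp hm
    exact pvLower_ne_nil p (hne p hp)
  have hMnb : ∀ m ∈ ps.map PySem.Chars.lower, '\\' ∉ m := by
    intro m hm
    obtain ⟨p, hp, rfl⟩ := List.mem_map.mp hm
    exact pvLower_not_mem p (hnb p hp)
  have hrootI : (['\\'] : List Char).intercalate [['.','.'], "upload".toList]
      = PySem.Chars.lower "..\\UPLOAD".toList := by decide
  have hrootpre : PySem.Chars.lower "..\\UPLOAD".toList ++ ['\\']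
      = ['.','.'] ++ '\\' :: ("upload".toList ++ '\\' :: []) := by decide
  have hIυ : (['\\'] : List Char).intercalate ["upload".toList] = "upload".toList := by decide
  have hd1 : ('\\' : Char) ∉ (['.','.'] : List Char) := by decide
  have hd2 : ('\\' : Char) ∉ "upload".toList := by decide
  -- characterizations of A's conditions
  have hc1 : (PySem.Chars.lower ((['\\'] : List Char).intercalate ps) = PySem.Chars.lower "..\\UPLOAD".toList)
      ↔ ps.map PySem.Chars.lower = [['.','.'], "upload".toList] := by
    constructor
    · intro h
      refine pvInterc_inj _ _ hMne hMnb (by decide) (by decide) ?_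
      rw [hrootI, ← hlow]
      exact h
    · intro h
      rw [hlow, h, hrootI]
  have hc3 : (PySem.Chars.lower ((['\\'] : List Char).intercalate ps) = "upload".toList)
      ↔ ps.map PySem.Chars.lower = ["upload".toList] := by
    constructor
    · intro h
      refine pvInterc_inj _ _ hMne hMnb (by decide) (by decide) ?_
      rw [hIυ, ← hlow]
      exact h
    · intro h
      rw [hlow, h, hIυ]
  have hc2 : (PySem.Chars.startswith (PySem.Chars.lower ((['\\'] : List Char).intercalate ps))
        (PySem.Chars.lower "..\\UPLOAD".toList ++ ['\\']) = true)
      ↔ ∃ M'', ps.map PySem.Chars.lower = ['.','.'] :: "upload".toList :: M'' ∧ M'' ≠ [] := by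
    rw [PySem.Chars.startswith_iff, hlow, hrootpre]
    rcases hM : ps.map PySem.Chars.lower with _ | ⟨m1, M'⟩
    · constructor
      · intro h
        have := h.length_le
        simp [List.intercalate] at this
      · rintro ⟨M'', hM'', -⟩; simp at hM''
    · have h1 := pvPrefix_iff ['.','.'] ("upload".toList ++ '\\' :: []) m1 M'
        (hMnb m1 (by rw [hM]; simp)) hd1
      rw [h1]
      constructor
      · rintro ⟨rfl, hM'ne, h2⟩
        rcases hM' : M' with _ | ⟨m2, M''⟩
        · exact absurd hM' hM'ne
        · rw [hM'] at h2
          rw [pvPrefix_iff "upload".toList [] m2 M''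
            (hMnb m2 (by rw [hM, hM']; simp)) hd2] at h2
          obtain ⟨rfl, hM''ne, -⟩ := h2
          exact ⟨M'', rfl, hM''ne⟩
      · rintro ⟨M'', hM'', hM''ne⟩
        injection hM'' with e1 e2
        subst e1
        refine ⟨rfl, by simp [e2], ?_⟩
        rw [e2]
        rw [pvPrefix_iff "upload".toList [] "upload".toList M''
          (by rw [hM] at hMnb; exact hMnb "upload".toList (by rw [e2]; simp)) hd2]
        exact ⟨rfl, hM''ne, List.nil_prefix⟩
  have hc4 : (PySem.Chars.startswith (PySem.Chars.lower ((['\\'] : List Char).intercalate ps))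
        ("upload".toList ++ ['\\']) = true)
      ↔ ∃ M', ps.map PySem.Chars.lower = "upload".toList :: M' ∧ M' ≠ [] := by
    rw [PySem.Chars.startswith_iff, hlow,
      show ("upload".toList ++ ['\\'] : List Char) = "upload".toList ++ '\\' :: [] from rfl]
    rcases hM : ps.map PySem.Chars.lower with _ | ⟨m1, M'⟩
    · constructor
      · intro h
        have := h.length_le
        simp [List.intercalate] at this
      · rintro ⟨M'', hM'', -⟩; simp at hM''
    · rw [pvPrefix_iff "upload".toList [] m1 M' (hMnb m1 (by rw [hM]; simp)) hd2]
      constructor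
      · rintro ⟨rfl, hM'ne, -⟩
        exact ⟨M', rfl, hM'ne⟩
      · rintro ⟨M'', hM'', hM''ne⟩
        injection hM'' with e1 e2
        subst e1
        exact ⟨rfl, by simp [e2, hM''ne], by rw [e2]; exact List.nil_prefix⟩
  by_cases h0 : ps = [] ∨ ps = [['.']]
  · have hA : (['\\'] : List Char).intercalate ps = [] ∨ (['\\'] : List Char).intercalate ps = ['.'] := by
      rcases h0 with rfl | rfl
      · left; simp [List.intercalate]
      · right; decide
    rw [if_pos hA, if_pos h0]
  · have hIe : ¬ ((['\\'] : List Char).intercalate ps = [] ∨ (['\\'] : List Char).intercalate ps = ['.']) := by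
      rintro (h | h)
      · exact h0 (Or.inl ((pvINE ps hne).mp h))
      · refine h0 (Or.inr ?_)
        refine pvInterc_inj _ _ hne hnb (by decide) (by decide) ?_
        rw [h]; decide
    rw [if_neg hIe, if_neg h0]
    by_cases hb1 : (ps.map PySem.Chars.lower).take 2 = [['.','.'], "upload".toList]
    · rw [if_pos hb1]
      rcases ps with _ | ⟨s1, ps1⟩
      · simp at hb1
      rcases ps1 with _ | ⟨s2, rest⟩
      · simp at hb1
      simp only [List.map_cons, List.take_succ_cons, List.take_zero, List.cons.injEq, and_true] at hb1
      have hl1 := hb1.1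
      have hl2 := hb1.2
      have hL1 : s1.length = 2 := by
        have := congrArg List.length hl1
        simpa [PySem.Chars.lower] using this
      have hL2 : s2.length = 6 := by
        have := congrArg List.length hl2
        simpa [PySem.Chars.lower] using this
      by_cases hr : rest = []
      · subst hr
        rw [if_pos (hc1.mpr (by simp [hl1, hl2]))]
        rw [show (([s1, s2] : List (List Char)).drop 2) = [] from rfl, pvJoin_eq]
        decide
      · rw [if_neg (by
          rw [hc1]
          intro h
          simp only [List.map_cons, List.cons.injEq] at h
          exact hr (List.map_eq_nil_iff.mp h.2.2))]
        rw [if_pos (hc2.mpr ⟨List.map PySem.Chars.lower rest,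
          by simp [hl1, hl2], by simp [hr]⟩)]
        rw [pvSlice10, pvDropIC10 s1 s2 rest hL1 hL2 hr]
        rw [show ((s1 :: s2 :: rest).drop 2) = rest from rfl, pvJoin_eq]
    · rw [if_neg hb1]
      by_cases hb2 : (ps.map PySem.Chars.lower).headI = "upload".toList
      · rw [if_pos hb2]
        rcases ps with _ | ⟨s1, ps1⟩
        · exact absurd (Or.inl rfl) h0
        have hl1 : PySem.Chars.lower s1 = "upload".toList := by simpa using hb2
        rw [if_neg (by
          rw [hc1]
          intro h
          simp only [List.map_cons, List.cons.injEq] at h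
          rw [hl1] at h
          exact absurd h.1 (by decide))]
        rw [if_neg (by
          rw [hc2]
          rintro ⟨M'', hM'', -⟩
          simp only [List.map_cons, List.cons.injEq] at hM''
          rw [hl1] at hM''
          exact absurd hM''.1 (by decide))]
        rcases ps1 with _ | ⟨s2, rest⟩
        · rw [if_pos (hc3.mpr (by simp [hl1]))]
          rw [show (([s1] : List (List Char)).drop 1) = [] from rfl, pvJoin_eq]
          decide
        · rw [if_neg (by rw [hc3]; intro h; simp at h)]
          rw [if_pos (hc4.mpr ⟨List.map PySem.Chars.lower (s2 :: rest),
            by simp [hl1], by simp⟩)]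
          have hL1 : s1.length = 6 := by
            have := congrArg List.length hl1
            simpa [PySem.Chars.lower] using this
          rw [pvSlice7, pvDropIC7 s1 (s2 :: rest) hL1 (by simp)]
          rw [show ((s1 :: s2 :: rest).drop 1) = s2 :: rest from rfl, pvJoin_eq]
      · rw [if_neg hb2]
        rw [if_neg (by rw [hc1]; intro h; exact hb1 (by rw [h]; rfl)),
            if_neg (by rw [hc2]; rintro ⟨M'', hM'', -⟩; exact hb1 (by rw [hM'']; rfl)),
            if_neg (by rw [hc3]; intro h; exact hb2 (by rw [h]; rfl)),
            if_neg (by rw [hc4]; rintro ⟨M', hM', -⟩; exact hb2 (by rw [hM']; rfl)),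
            pvJoin_eq]

-- ===== VERDICT (by name: the statement is the Claim_ definition above) =====
theorem normalizar_pasta_remota_py_spec : Claim_equal_normalizar_pasta_remota_py := by
  unfold Claim_equal_normalizar_pasta_remota_py
  intro pasta _
  unfold Spec_normalizar_pasta_remota_py
  simp only [normalizar_pasta_remota_py, normalizar_pasta_remota_py_alt]
  generalize (PySem.Chars.replace (PySem.Chars.strip pasta.toList) ['/'] ['\\']) = t0
  rw [pvStripChars_eq, pvCollapse_eq, pvStrip_squash, pvSplitOn_eq]
  exact pvBranches (pvParts t0) (pvParts_mem_ne_nil t0) (pvParts_not_mem t0)
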